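-- pv_equiv track=rewrite | github.com/voruganti96/Competitive-Programming | 03-kth_occurrences-Python/kth_occurrences.py | fun_kth_occurrences
-- ===== SOURCE A (Python) =====
-- def fun_kth_occurrences(s, n):
-- 	d = {}
--
-- 	for i in s:
-- 		if i in d:
-- 			d[i] = d[i] +1
-- 		else:
-- 			d[i]= 1
--
--
-- 	l = sorted(d.items(), key = lambda x: x[1], reverse= True)
--
-- 	return l[n-1][0]
-- ===== SOURCE B (Python) =====
-- def fun_kth_occurrences(s, n):
--     counts = {}
--     for i in s:
--         counts[i] = counts.get(i, 0) + 1
--     buckets = {}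
--     for ch, c in counts.items():
--         buckets.setdefault(c, []).append(ch)
--     ordered = []
--     for c in sorted(buckets, reverse=True):
--         ordered.extend(buckets[c])
--     return ordered[n - 1]
-- ===== Notes on version B (the rewrite author's own statement) =====
-- stated objective: alternative
-- what changed: B replaces A's stable sort of all (element, count) pairs by a counting-sort-style frequency index: it groups elements into count->elements buckets in first-occurrence order, sorts only the distinct counts descending, and concatenates the buckets before indexing at n-1.
import Mathlib
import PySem

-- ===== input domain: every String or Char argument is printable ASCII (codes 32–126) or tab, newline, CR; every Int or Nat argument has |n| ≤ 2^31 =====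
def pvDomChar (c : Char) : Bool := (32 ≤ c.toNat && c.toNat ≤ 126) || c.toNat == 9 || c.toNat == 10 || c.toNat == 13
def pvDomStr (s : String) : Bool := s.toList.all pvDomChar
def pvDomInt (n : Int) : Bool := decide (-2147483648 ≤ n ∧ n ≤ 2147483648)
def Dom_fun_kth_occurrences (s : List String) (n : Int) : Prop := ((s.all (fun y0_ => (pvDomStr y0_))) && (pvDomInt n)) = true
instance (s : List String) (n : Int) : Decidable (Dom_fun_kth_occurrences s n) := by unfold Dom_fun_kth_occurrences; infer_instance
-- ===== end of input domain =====

-- B replaces A's sort of all (element, count) pairs by a count→elements bucket index: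
-- it groups elements by count, sorts only the distinct counts descending, and concatenates
-- the buckets; same return value on every input where A returns (A raises IndexError outside Pre_).

-- ===== PORT A =====
-- d[i] is read under 'i in d', so Dict.getD is exact; l[n-1] raises IndexError exactly
-- where pyGet? is none (excluded by Pre_), so the .getD default is never read inside Pre_.
def fun_kth_occurrences (s : List String) (n : Int) : String :=
  let d : PySem.Dict String Int :=
    s.foldl (fun d i => if d.contains i then d.insert i (d.getD i 0 + 1) else d.insert i 1)
      PySem.Dict.empty
  let l := PySem.List.sorted d.items (fun x => x.2) true
  ((PySem.List.pyGet? l (n - 1)).getD ("", 0)).1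

-- ===== PORT B =====
-- counts.get(i, 0) is Dict.getD; buckets.setdefault(c, []).append(ch) is
-- insert c (getD c [] ++ [ch]); buckets[c] is read for c a key, so getD is exact;
-- ordered[n-1] raises exactly where pyGet? is none (excluded by Pre_).
def fun_kth_occurrences_alt (s : List String) (n : Int) : String :=
  let counts : PySem.Dict String Int :=
    s.foldl (fun d i => d.insert i (d.getD i 0 + 1)) PySem.Dict.empty
  let buckets : PySem.Dict Int (List String) :=
    counts.items.foldl (fun b p => b.insert p.2 (b.getD p.2 [] ++ [p.1])) PySem.Dict.empty
  let ordered :=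
    (PySem.List.sorted buckets.keys (fun c => c) true).foldl
      (fun acc c => acc ++ buckets.getD c []) []
  (PySem.List.pyGet? ordered (n - 1)).getD ""

-- ===== PRECONDITION & SPEC =====
-- Pre_ excludes exactly the inputs where Python's l[n-1] raises IndexError:
-- the index n-1 must be in range for a list whose length is the number of distinct strings in s.
def Pre_fun_kth_occurrences (s : List String) (n : Int) : Prop :=
  -(((PySem.Set.ofList s).length : Int)) ≤ n - 1 ∧ n - 1 < ((PySem.Set.ofList s).length : Int)
instance (s : List String) (n : Int) : Decidable (Pre_fun_kth_occurrences s n) := by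
  unfold Pre_fun_kth_occurrences; infer_instance

def pvWitness_fun_kth_occurrences : List String × Int := (["a", "b", "a"], 1)

def Spec_fun_kth_occurrences (s : List String) (n : Int) (out : String) : Prop := out = fun_kth_occurrences_alt s n
instance (s : List String) (n : Int) (out : String) : Decidable (Spec_fun_kth_occurrences s n out) := by unfold Spec_fun_kth_occurrences; infer_instance

-- ===== CLAIM (what is proved, stated in full; the proofs are below) =====
def Claim_equal_fun_kth_occurrences : Prop := ∀ (s : List String) (n : Int), Dom_fun_kth_occurrences s n → Pre_fun_kth_occurrences s n → Spec_fun_kth_occurrences s n (fun_kth_occurrences s n)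

-- ===== LEMMAS AND PROOFS =====

-- Proof-side names for the stages of B.
def pvCounts (s : List String) : PySem.Dict String Int :=
  s.foldl (fun d i => d.insert i (d.getD i 0 + 1)) PySem.Dict.empty

def pvBuckets (s : List String) : PySem.Dict Int (List String) :=
  (pvCounts s).items.foldl (fun b p => b.insert p.2 (b.getD p.2 [] ++ [p.1])) PySem.Dict.empty

def pvCs (s : List String) : List Int :=
  PySem.List.sorted (pvBuckets s).keys (fun c => c) true

def pvOrdered (s : List String) : List String :=
  (pvCs s).foldl (fun acc c => acc ++ (pvBuckets s).getD c []) []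

-- A's counting loop builds the same dict as B's (the contains-branch is the getD form).
lemma countsA_eq (s : List String) :
    s.foldl (fun d i => if d.contains i then d.insert i (d.getD i 0 + 1) else d.insert i 1)
      PySem.Dict.empty = pvCounts s := by
  unfold pvCounts
  apply PySem.List.foldl_congr_mem
  intro d i _
  by_cases h : d.contains i = true
  · simp [h]
  · simp only [Bool.not_eq_true] at h
    simp [h, PySem.Dict.getD_of_not_contains d 0 h]

-- inserting behind a prefix that never triggers `before`
lemma insertBy_append_left {α : Type} (before : α → α → Bool) (x : α) (l r : List α)
    (h : ∀ y ∈ l, before x y = false) :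
    PySem.List.insertBy before x (l ++ r) = l ++ PySem.List.insertBy before x r := by
  induction l with
  | nil => simp
  | cons y ys ih =>
      simp only [List.cons_append, PySem.List.insertBy.eq_2, h y (List.mem_cons_self),
        Bool.false_eq_true, if_false]
      rw [ih (fun z hz => h z (List.mem_cons_of_mem _ hz))]

-- inserting in front of a suffix that always triggers `before`
lemma insertBy_all_before {α : Type} (before : α → α → Bool) (x : α) (r : List α)
    (h : ∀ y ∈ r, before x y = true) :
    PySem.List.insertBy before x r = x :: r := by
  cases r with
  | nil => simp [PySem.List.insertBy.eq_1]
  | cons y ys => simp [PySem.List.insertBy.eq_2, h y (List.mem_cons_self)]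

lemma key_mem_of_mem_flatMap_filter {α : Type} (key : α → Int) (cs : List Int) (p : List α)
    {y : α} (hy : y ∈ cs.flatMap (fun c => p.filter (fun a => key a == c))) : key y ∈ cs := by
  rcases List.mem_flatMap.mp hy with ⟨c, hc, hyc⟩
  rcases List.mem_filter.mp hyc with ⟨-, he⟩
  rw [beq_iff_eq] at he
  exact he ▸ hc

-- one stable reverse-insertion into the bucketed list
lemma insertBy_buckets {α : Type} (key : α → Int) (x : α) :
    ∀ (cs : List Int), cs.Pairwise (fun a b => b < a) → key x ∈ cs → ∀ (p : List α),
    PySem.List.insertBy (fun a b => decide (key b < key a)) x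
        (cs.flatMap (fun c => p.filter (fun a => key a == c)))
      = cs.flatMap (fun c => (p ++ [x]).filter (fun a => key a == c)) := by
  intro cs
  induction cs with
  | nil => intro _ hx; exact absurd hx (List.not_mem_nil)
  | cons c cs ih =>
      intro hpw hx p
      have hpw' := (List.pairwise_cons.mp hpw).2
      have hlt := (List.pairwise_cons.mp hpw).1
      simp only [List.flatMap_cons]
      by_cases hxc : key x = c
      · rw [insertBy_append_left _ _ _ _ (by
          intro y hy
          have : key y = c := by
            rcases List.mem_filter.mp hy with ⟨-, he⟩; exact beq_iff_eq.mp he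
          simp [this, hxc])]
        rw [insertBy_all_before _ _ _ (by
          intro y hy
          have hk := key_mem_of_mem_flatMap_filter key cs p hy
          simp [hxc, hlt _ hk])]
        have hfx : ∀ c' ∈ cs, (p ++ [x]).filter (fun a => key a == c') =
            p.filter (fun a => key a == c') := by
          intro c' hc'
          have hne : key x ≠ c' := by have := hlt _ hc'; omega
          simp [List.filter_append, hne]
        rw [List.flatMap_congr (fun c' hc' => hfx c' hc')]
        simp [List.filter_append, hxc]
      · have hx' : key x ∈ cs := by
          rcases List.mem_cons.mp hx with h | h
          · exact absurd h hxc
          · exact h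
        rw [insertBy_append_left _ _ _ _ (by
          intro y hy
          have : key y = c := by
            rcases List.mem_filter.mp hy with ⟨-, he⟩; exact beq_iff_eq.mp he
          have : ¬ (key y < key x) := by
            have := hlt _ hx'
            omega
          simp [this])]
        rw [ih hpw' hx' p]
        have : (p ++ [x]).filter (fun a => key a == c) = p.filter (fun a => key a == c) := by
          simp [List.filter_append, hxc]
        rw [this]

lemma foldl_insertBy_buckets {α : Type} (key : α → Int) (cs : List Int)
    (hpw : cs.Pairwise (fun a b => b < a)) :
    ∀ (xs p : List α), (∀ a ∈ xs, key a ∈ cs) →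
    xs.foldl (fun acc a => PySem.List.insertBy (fun a b => decide (key b < key a)) a acc)
        (cs.flatMap (fun c => p.filter (fun a => key a == c)))
      = cs.flatMap (fun c => (p ++ xs).filter (fun a => key a == c)) := by
  intro xs
  induction xs with
  | nil => intro p _; simp
  | cons x xs ih =>
      intro p hmem
      simp only [List.foldl_cons]
      rw [insertBy_buckets key x cs hpw (hmem x (List.mem_cons_self)) p]
      rw [ih (p ++ [x]) (fun a ha => hmem a (List.mem_cons_of_mem _ ha))]
      simp

-- the stable reverse sort by key IS the concatenation of the key-buckets,
-- taken along any strictly decreasing list of keys covering all of xs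
lemma sorted_rev_eq_flatMap_filter {α : Type} (key : α → Int) (xs : List α) (cs : List Int)
    (hpw : cs.Pairwise (fun a b => b < a)) (hmem : ∀ a ∈ xs, key a ∈ cs) :
    PySem.List.sorted xs key true = cs.flatMap (fun c => xs.filter (fun a => key a == c)) := by
  rw [PySem.List.sorted_rev_eq_foldl_insertBy]
  have h0 : ([] : List α) = cs.flatMap (fun c => ([] : List α).filter (fun a => key a == c)) := by
    simp
  rw [h0, foldl_insertBy_buckets key cs hpw xs [] hmem]
  simp

-- contents of the bucket dict
lemma getD_bucketsFold (ps : List (String × Int)) :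
    ∀ (b : PySem.Dict Int (List String)) (c : Int),
    (ps.foldl (fun b p => b.insert p.2 (b.getD p.2 [] ++ [p.1])) b).getD c []
      = b.getD c [] ++ (ps.filter (fun p => p.2 == c)).map Prod.fst := by
  induction ps with
  | nil => intro b c; simp
  | cons p ps ih =>
      intro b c
      simp only [List.foldl_cons]
      rw [ih]
      by_cases h : p.2 = c
      · simp [h]
      · have h' : c ≠ p.2 := fun hc => h hc.symm
        simp [PySem.Dict.getD_insert, h', h]

lemma keys_pvBuckets (s : List String) :
    (pvBuckets s).keys = PySem.Set.ofList ((pvCounts s).items.map (fun p => p.2)) := by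
  unfold pvBuckets
  rw [PySem.Dict.keys_foldl_insert_key ((pvCounts s).items) (fun p => p.2)
    (fun b p => b.getD p.2 [] ++ [p.1])]
  rw [PySem.Dict.keys_empty, PySem.Set.update_nil_left]

lemma pvCs_pairwise (s : List String) : (pvCs s).Pairwise (fun a b => b < a) := by
  have hnd : (pvCs s).Nodup := by
    have hperm := PySem.List.sorted_perm (pvBuckets s).keys (fun c => c) true
    have : (pvBuckets s).keys.Nodup := by
      rw [keys_pvBuckets]; exact PySem.Set.nodup_ofList _
    exact hperm.nodup_iff.mpr this
  have hle := PySem.List.sorted_pairwise_rev (pvBuckets s).keys (fun c => c)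
  have := List.Pairwise.and hle hnd
  exact this.imp (fun h => lt_of_le_of_ne h.1 (Ne.symm h.2))

lemma mem_pvCs (s : List String) : ∀ p ∈ (pvCounts s).items, p.2 ∈ pvCs s := by
  intro p hp
  unfold pvCs
  rw [PySem.List.mem_sorted, keys_pvBuckets, PySem.Set.mem_ofList]
  exact List.mem_map_of_mem hp

-- B's ordered list is A's sorted pair list projected to first components
lemma pvOrdered_eq (s : List String) :
    pvOrdered s = (PySem.List.sorted (pvCounts s).items (fun x => x.2) true).map Prod.fst := by
  unfold pvOrdered
  rw [PySem.List.foldl_append_eq_flatMap]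
  rw [sorted_rev_eq_flatMap_filter (fun x => x.2) (pvCounts s).items (pvCs s)
    (pvCs_pairwise s) (mem_pvCs s)]
  rw [List.map_flatMap]
  simp only [List.nil_append]
  apply List.flatMap_congr
  intro c _
  have := getD_bucketsFold (pvCounts s).items PySem.Dict.empty c
  unfold pvBuckets
  rw [this, PySem.Dict.getD_empty, List.nil_append]

lemma pyGet?_map_fst (l : List (String × Int)) (i : Int) :
    PySem.List.pyGet? (l.map Prod.fst) i = (PySem.List.pyGet? l i).map Prod.fst := by
  simp [PySem.List.pyGet?]

-- ===== VERDICT (by name: the statement is the Claim_ definition above) =====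
theorem fun_kth_occurrences_spec : Claim_equal_fun_kth_occurrences := by
  intro s n _ _
  unfold Spec_fun_kth_occurrences
  have hA : fun_kth_occurrences s n =
      ((PySem.List.pyGet? (PySem.List.sorted (pvCounts s).items (fun x => x.2) true)
        (n - 1)).getD ("", 0)).1 := by
    simp only [fun_kth_occurrences, countsA_eq s]
  have hB : fun_kth_occurrences_alt s n =
      (PySem.List.pyGet? (pvOrdered s) (n - 1)).getD "" := rfl
  rw [hA, hB, pvOrdered_eq s, pyGet?_map_fst]
  cases PySem.List.pyGet? (PySem.List.sorted (pvCounts s).items (fun x => x.2) true) (n - 1) with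
  | none => rfl
  | some p => rfl
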